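-- pv_equiv track=rewrite | github.com/abhaysp95/language_files | npython/practice/infytq_practice/demo_questions/demo5.py | function
-- ===== SOURCE A (Python) =====
-- def function(string, list1):
--     num = 0  # line1
--     while num != len(string):
--         if len(string) % 2 == 0 or (string[num] in ['a', 'e', 'i', 'o', 'u']):
--             list1.append(string[num])
--         num += 1  # line 2
--         function(string[num:], list1)  # line 3
--         break
--     return list1
-- ===== SOURCE B (Python) =====
-- def function(string, list1):
--     even_suffix = (len(string) % 2 == 0)
--     for ch in string:
--         if even_suffix or ch in ('a', 'e', 'i', 'o', 'u'):
--             list1.append(ch)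
--         even_suffix = not even_suffix
--     return list1
-- ===== Notes on version B (the rewrite author's own statement) =====
-- stated objective: faster
-- what changed: Replaced A's recursion on ever-shorter string slices (each slice copy and len re-check costing O(n) per step) by a single forward loop that maintains the suffix-length parity as a boolean flipped each step.
import Mathlib
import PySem

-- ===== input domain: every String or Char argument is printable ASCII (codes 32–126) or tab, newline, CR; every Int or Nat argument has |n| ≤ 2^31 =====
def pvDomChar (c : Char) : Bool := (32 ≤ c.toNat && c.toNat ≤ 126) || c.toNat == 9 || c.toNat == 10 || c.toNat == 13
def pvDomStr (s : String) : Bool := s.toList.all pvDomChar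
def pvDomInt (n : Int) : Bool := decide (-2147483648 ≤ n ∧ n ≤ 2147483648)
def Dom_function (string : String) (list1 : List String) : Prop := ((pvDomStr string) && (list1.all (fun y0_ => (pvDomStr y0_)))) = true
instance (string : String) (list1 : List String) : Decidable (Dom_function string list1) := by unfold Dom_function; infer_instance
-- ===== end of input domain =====

-- B replaces A's recursion on string slices by one forward loop maintaining the
-- suffix-length parity as a flipped boolean (objective: simpler). Both A and B
-- append to list1 in place in Python; the theorem is about the return value.

-- ===== PORT A =====
-- A: while num != len(string): test parity of len(string) / vowel at index 0,
-- advance, recurse on string[num:], break.  One loop iteration = one recursive call.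
def functionGoA : List Char → List String → List String
  | [], list1 => list1
  | c :: rest, list1 =>
      -- if len(string) % 2 == 0 or string[0] in vowels: list1.append(string[0])
      let list1' := if (c :: rest).length % 2 == 0
          || (c == 'a' || c == 'e' || c == 'i' || c == 'o' || c == 'u')
        then list1 ++ [String.singleton c] else list1
      -- function(string[1:], list1); break
      functionGoA rest list1'

def function (string : String) (list1 : List String) : List String :=
  functionGoA string.toList list1

-- ===== PORT B =====
-- B: single pass carrying (even_suffix, accumulated list1) as fold state.
def function_alt (string : String) (list1 : List String) : List String :=
  (string.toList.foldl
    (fun (st : Bool × List String) ch =>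
      (!st.1,
       if st.1 || (ch == 'a' || ch == 'e' || ch == 'i' || ch == 'o' || ch == 'u')
         then st.2 ++ [String.singleton ch] else st.2))
    (string.toList.length % 2 == 0, list1)).2

-- ===== PRECONDITION & SPEC =====
def Spec_function (string : String) (list1 : List String) (out : List String) : Prop := out = function_alt string list1
instance (string : String) (list1 : List String) (out : List String) : Decidable (Spec_function string list1 out) := by unfold Spec_function; infer_instance

-- ===== CLAIM (what is proved, stated in full; the proofs are below) =====
def Claim_equal_function : Prop := ∀ (string : String) (list1 : List String), Dom_function string list1 → Spec_function string list1 (function string list1)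

-- ===== LEMMAS AND PROOFS =====
theorem mod_flip (n : Nat) : ((n + 1) % 2 == 0) = !(n % 2 == 0) := by
  rcases Nat.mod_two_eq_zero_or_one n with h | h <;> simp [Nat.add_mod, h]

theorem goA_eq_foldl (s : List Char) (l : List String) :
    functionGoA s l =
      (s.foldl
        (fun (st : Bool × List String) ch =>
          (!st.1,
           if st.1 || (ch == 'a' || ch == 'e' || ch == 'i' || ch == 'o' || ch == 'u')
             then st.2 ++ [String.singleton ch] else st.2))
        (s.length % 2 == 0, l)).2 := by
  induction s generalizing l with
  | nil => rfl
  | cons c rest ih =>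
      simp only [functionGoA, List.foldl_cons, List.length_cons]
      rw [ih]; simp only [mod_flip, Bool.not_not]

-- ===== VERDICT (by name: the statement is the Claim_ definition above) =====
theorem function_spec : Claim_equal_function := by
  intro string list1 _
  unfold Spec_function function function_alt
  exact goA_eq_foldl _ _
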